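-- pv_equiv track=rewrite | github.com/Codaily/Algorithm_Programmers | Level2/더 맵게/soohee.py | solution
-- ===== SOURCE A (Python) =====
-- import heapq
--
-- def solution(scoville, K):
--     cnt = 0
--     heapq.heapify(scoville)
--     first = heapq.heappop(scoville)
--     while first < K:
--         if len(scoville) > 0:
--             second = heapq.heappop(scoville)
--             first = heapq.heappushpop(scoville, first+second*2)
--             cnt += 1
--         else :
--             return -1
--     return cnt
-- ===== SOURCE B (Python) =====
-- def _insort(s, x):
--     # insert x into sorted list s, after any equal elements
--     i = 0
--     while i < len(s) and s[i] <= x: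
--         i += 1
--     s.insert(i, x)
--
-- def solution(scoville, K):
--     scoville.sort()
--     cnt = 0
--     while scoville[0] < K:
--         if len(scoville) < 2:
--             return -1
--         a = scoville.pop(0)
--         b = scoville.pop(0)
--         _insort(scoville, a + 2 * b)
--         cnt += 1
--     return cnt
-- ===== Notes on version B (the rewrite author's own statement) =====
-- stated objective: alternative
-- what changed: Replaces the binary heap (heapify + heappop + heappushpop) with a one-time sort followed by popping the two head elements and re-inserting the combined value in sorted position with a hand-written linear insort.
import Mathlib
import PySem

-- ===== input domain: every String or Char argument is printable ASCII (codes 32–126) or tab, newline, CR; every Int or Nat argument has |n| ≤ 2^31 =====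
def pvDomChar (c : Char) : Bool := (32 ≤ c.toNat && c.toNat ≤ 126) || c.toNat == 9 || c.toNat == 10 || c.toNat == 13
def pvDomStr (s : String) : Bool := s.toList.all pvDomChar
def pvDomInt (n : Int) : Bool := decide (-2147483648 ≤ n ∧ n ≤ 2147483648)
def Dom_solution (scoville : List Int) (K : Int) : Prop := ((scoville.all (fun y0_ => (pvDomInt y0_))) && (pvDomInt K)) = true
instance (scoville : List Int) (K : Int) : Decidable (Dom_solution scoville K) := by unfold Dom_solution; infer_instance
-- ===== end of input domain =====

-- B replaces A's binary heap with sort-once + linear insort (alternative decomposition, same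
-- return value); both Pythons mutate `scoville` in place — the equivalence proved is about the
-- RETURN value only.


-- ===== PORT A =====
-- A uses the heapq library. The library calls are ported by their value-level contract
-- (heappop = extract the minimum value, heappushpop x = return min(x, min heap) and keep the
-- rest): this is exact for the RETURN value of `solution`, which depends only on the multiset
-- of values in the heap, never on the heap's internal array layout.
-- The while loop of A becomes `solutionLoopA first heap K cnt`.
def solutionLoopA (first : Int) (heap : List Int) (K : Int) (cnt : Int) : Int :=
  if first < K then
    if 0 < heap.length then
      match hm : PySem.List.min? heap (fun x => x) with
      | none => 0  -- unreachable: heap is nonempty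
      | some second =>
        -- second = heapq.heappop(scoville)
        let heap1 := heap.erase second
        let pushed := first + second * 2
        -- first = heapq.heappushpop(scoville, first + second*2)
        match hm2 : PySem.List.min? heap1 (fun x => x) with
        | none => solutionLoopA pushed heap1 K (cnt + 1)          -- pushpop on empty heap
        | some m =>
          if m < pushed then
            solutionLoopA m (heap1.erase m ++ [pushed]) K (cnt + 1)
          else
            solutionLoopA pushed heap1 K (cnt + 1)
    else -1
  else cnt
termination_by heap.length
decreasing_by
  · have h2 : second ∈ heap := PySem.List.min?_mem hm
    have h3 := List.length_erase_of_mem h2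
    omega
  · have h2 : second ∈ heap := PySem.List.min?_mem hm
    have hml : m ∈ heap.erase second := PySem.List.min?_mem hm2
    have h3 := List.length_erase_of_mem h2
    have h4 := List.length_erase_of_mem hml
    have h6 := List.length_pos_of_mem hml
    simp only [List.length_append, List.length_cons, List.length_nil]
    omega
  · have h2 : second ∈ heap := PySem.List.min?_mem hm
    have h3 := List.length_erase_of_mem h2
    omega

def solution (scoville : List Int) (K : Int) : Int :=
  -- cnt = 0; heapq.heapify(scoville) (in-place permutation); first = heapq.heappop(scoville)
  match PySem.List.min? scoville (fun x => x) with
  | none => 0  -- Python raises IndexError on an empty list; excluded by Pre_solution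
  | some first => solutionLoopA first (scoville.erase first) K 0

-- ===== PORT B =====
-- _insort: insert x into the sorted list after any equal elements (Source B's hand-written loop:
-- advance past every element ≤ x, insert there).
def solutionInsort (s : List Int) (x : Int) : List Int :=
  match s with
  | [] => [x]
  | y :: t => if x < y then x :: y :: t else y :: solutionInsort t x

theorem solutionInsort_length (s : List Int) (x : Int) :
    (solutionInsort s x).length = s.length + 1 := by
  induction s with
  | nil => rfl
  | cons y t ih => simp only [solutionInsort]; split <;> simp [ih]

-- the while loop of Source B over the sorted list
def solutionLoopB (s : List Int) (K : Int) (cnt : Int) : Int :=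
  match s with
  | [] => 0  -- unreachable inside Pre_solution (Python raises IndexError)
  | a :: rest =>
    if a < K then
      match rest with
      | [] => -1
      | b :: rest' => solutionLoopB (solutionInsort rest' (a + 2 * b)) K (cnt + 1)
    else cnt
termination_by s.length
decreasing_by simp [solutionInsort_length]

def solution_alt (scoville : List Int) (K : Int) : Int :=
  solutionLoopB (PySem.List.sorted scoville (fun x => x) false) K 0

-- ===== PRECONDITION & SPEC =====
-- Pre_ excludes only the empty list, on which both Pythons raise IndexError.
def Pre_solution (scoville : List Int) (K : Int) : Prop := scoville ≠ []
instance (scoville : List Int) (K : Int) : Decidable (Pre_solution scoville K) := by unfold Pre_solution; infer_instance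
def pvWitness_solution : List Int × Int := ([1, 2, 3, 9, 10, 12], 7)

def Spec_solution (scoville : List Int) (K : Int) (out : Int) : Prop := out = solution_alt scoville K
instance (scoville : List Int) (K : Int) (out : Int) : Decidable (Spec_solution scoville K out) := by unfold Spec_solution; infer_instance

-- ===== CLAIM (what is proved, stated in full; the proofs are below) =====
def Claim_equal_solution : Prop := ∀ (scoville : List Int) (K : Int), Dom_solution scoville K → Pre_solution scoville K → Spec_solution scoville K (solution scoville K)

-- ===== LEMMAS AND PROOFS =====

theorem solutionInsort_perm (s : List Int) (x : Int) :
    (solutionInsort s x).Perm (x :: s) := by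
  induction s with
  | nil => rfl
  | cons y t ih =>
    simp only [solutionInsort]
    split
    · rfl
    · exact (ih.cons y).trans (List.Perm.swap x y t)

theorem solutionInsort_pairwise (s : List Int) (x : Int)
    (hs : s.Pairwise (· ≤ ·)) : (solutionInsort s x).Pairwise (· ≤ ·) := by
  induction s with
  | nil => simp [solutionInsort]
  | cons y t ih =>
    rcases List.pairwise_cons.mp hs with ⟨hy, ht⟩
    simp only [solutionInsort]
    split
    · rename_i hlt
      refine List.pairwise_cons.mpr ⟨?_, hs⟩
      intro z hz
      rcases List.mem_cons.mp hz with rfl | hz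
      · exact le_of_lt hlt
      · exact le_of_lt (lt_of_lt_of_le hlt (hy z hz))
    · rename_i hnlt
      refine List.pairwise_cons.mpr ⟨?_, ih ht⟩
      intro z hz
      have hz' : z ∈ x :: t := (solutionInsort_perm t x).mem_iff.mp hz
      rcases List.mem_cons.mp hz' with rfl | hz'
      · exact le_of_not_gt hnlt
      · exact hy z hz'

-- a sorted list permutation-equal to first :: heap with first minimal starts with first
theorem sorted_head (s heap : List Int) (first : Int)
    (hp : s.Perm (first :: heap)) (hs : s.Pairwise (· ≤ ·))
    (hmin : ∀ x ∈ heap, first ≤ x) :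
    ∃ s', s = first :: s' ∧ s'.Perm heap ∧ s'.Pairwise (· ≤ ·) := by
  cases s with
  | nil => exact absurd (hp.symm.eq_nil) (by simp)
  | cons h t =>
    rcases List.pairwise_cons.mp hs with ⟨hh, ht⟩
    have hmem : h ∈ first :: heap := hp.mem_iff.mp (List.mem_cons_self)
    have h1 : first ≤ h := by
      rcases List.mem_cons.mp hmem with rfl | hmem
      · exact le_refl _
      · exact hmin h hmem
    have hfmem : first ∈ h :: t := hp.mem_iff.mpr (List.mem_cons_self)
    have h2 : h ≤ first := by
      rcases List.mem_cons.mp hfmem with rfl | hf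
      · exact le_refl _
      · exact hh first hf
    have : h = first := le_antisymm h2 h1
    subst this
    exact ⟨t, rfl, hp.cons_inv, ht⟩

-- core invariant: the loop of A on any multiset equals the loop of B on its sorted arrangement
theorem loop_eq (n : Nat) : ∀ (heap : List Int) (first K cnt : Int) (s : List Int),
    heap.length ≤ n →
    s.Perm (first :: heap) → s.Pairwise (· ≤ ·) → (∀ x ∈ heap, first ≤ x) →
    solutionLoopA first heap K cnt = solutionLoopB s K cnt := by
  induction n with
  | zero =>
    intro heap first K cnt s hlen hp hs hmin
    have : heap = [] := List.length_eq_zero_iff.mp (Nat.le_zero.mp hlen)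
    subst this
    rcases sorted_head s [] first hp hs hmin with ⟨s', rfl, hp', _⟩
    have : s' = [] := hp'.eq_nil
    subst this
    rw [solutionLoopA.eq_def, solutionLoopB.eq_def]
    by_cases h : first < K <;> simp [h]
  | succ n ih =>
    intro heap first K cnt s hlen hp hs hmin
    rcases sorted_head s heap first hp hs hmin with ⟨s', rfl, hp', hs'⟩
    rw [solutionLoopA.eq_def, solutionLoopB.eq_def]
    by_cases hK : first < K
    · simp only [if_pos hK]
      cases heap with
      | nil =>
        have : s' = [] := hp'.eq_nil
        subst this
        simp
      | cons h0 hrest =>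
        have hne : (h0 :: hrest) ≠ [] := by simp
        have hlen0 : 0 < (h0 :: hrest).length := by simp
        simp only [if_pos hlen0]
        -- s' is nonempty too
        cases s' with
        | nil => exact absurd hp'.symm.eq_nil hne
        | cons b rest' =>
          rcases List.pairwise_cons.mp hs' with ⟨hb, hrest'⟩
          -- split A's match on min? of the nonempty heap; its value `second` equals b
          split
          · rename_i hm
            exact absurd ((PySem.List.min?_eq_none_iff _ _).mp hm) hne
          · rename_i second hm
            have hsecmem : second ∈ h0 :: hrest := PySem.List.min?_mem hm
            have hsecmin : ∀ y ∈ h0 :: hrest, second ≤ y := by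
              intro y hy; exact PySem.List.min?_isMin hm y hy
            have hbmem : b ∈ h0 :: hrest := hp'.mem_iff.mp List.mem_cons_self
            have hbsec : b = second := by
              have h1 : second ≤ b := hsecmin b hbmem
              have h2 : b ≤ second := by
                have : second ∈ b :: rest' := hp'.mem_iff.mpr hsecmem
                rcases List.mem_cons.mp this with rfl | hmem
                · exact le_refl _
                · exact hb second hmem
              exact le_antisymm h2 h1
            subst hbsec
            -- rest' ~ heap.erase b
            have hperase : (h0 :: hrest).Perm (b :: (h0 :: hrest).erase b) :=
              List.perm_cons_erase hbmem
            have hrp : rest'.Perm ((h0 :: hrest).erase b) :=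
              (hp'.trans hperase).cons_inv
            set heap1 := (h0 :: hrest).erase b with hh1
            have hlen1 : heap1.length = hrest.length := by
              have := List.length_erase_of_mem hbmem
              rw [hh1, this]; simp
            have he : first + 2 * b = first + b * 2 := by ring
            -- the insorted list is a sorted arrangement of pushed :: heap1
            have hins : (solutionInsort rest' (first + 2 * b)).Perm
                ((first + b * 2) :: heap1) := by
              have h := (solutionInsort_perm rest' (first + 2 * b)).trans
                (hrp.cons (first + 2 * b))
              have h2 : ((first + 2 * b) :: heap1).Perm ((first + b * 2) :: heap1) := by
                rw [he]
              exact h.trans h2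
            have hinsp : (solutionInsort rest' (first + 2 * b)).Pairwise (· ≤ ·) :=
              solutionInsort_pairwise _ _ hrest'
            -- split A's match on min? heap1 (the heappushpop)
            split
            · rename_i hm2
              -- heap empty after the second pop: pushpop returns pushed on the empty heap
              have h10 : heap1 = [] := (PySem.List.min?_eq_none_iff _ _).mp hm2
              have hlen' : heap1.length ≤ n := by rw [h10]; simp
              refine ih heap1 (first + b * 2) K (cnt + 1) _ hlen' hins hinsp ?_
              rw [h10]; simp
            · rename_i m hm2
              have hmmem : m ∈ heap1 := PySem.List.min?_mem hm2
              have hmmin : ∀ y ∈ heap1, m ≤ y := by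
                intro y hy; exact PySem.List.min?_isMin hm2 y hy
              have hlen' : heap1.length ≤ n := by
                simp only [List.length_cons] at hlen; omega
              by_cases hcmp : m < first + b * 2
              · rw [if_pos hcmp]
                -- A continues with first = m, heap = heap1.erase m ++ [pushed]
                have hperm2 : (solutionInsort rest' (first + 2 * b)).Perm
                    (m :: (heap1.erase m ++ [first + b * 2])) := by
                  refine hins.trans ?_
                  have h1 : heap1.Perm (m :: heap1.erase m) := List.perm_cons_erase hmmem
                  exact ((h1.cons _).trans
                    (List.Perm.swap m _ (heap1.erase m))).trans
                    (List.Perm.cons m (List.perm_append_singleton _ (heap1.erase m)).symm)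
                have hmin2 : ∀ x ∈ heap1.erase m ++ [first + b * 2], m ≤ x := by
                  intro x hx
                  rcases List.mem_append.mp hx with hx | hx
                  · exact hmmin x (List.mem_of_mem_erase hx)
                  · simp at hx; subst hx; exact le_of_lt hcmp
                have hlen2 : (heap1.erase m ++ [first + b * 2]).length ≤ n := by
                  have h3 := List.length_erase_of_mem hmmem
                  have h4 := List.length_pos_of_mem hmmem
                  simp only [List.length_append, List.length_cons, List.length_nil]
                  omega
                exact ih _ m K (cnt + 1) _ hlen2 hperm2 hinsp hmin2
              · rw [if_neg hcmp]
                have hmin2 : ∀ x ∈ heap1, first + b * 2 ≤ x := fun x hx =>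
                  le_trans (le_of_not_gt hcmp) (hmmin x hx)
                exact ih heap1 (first + b * 2) K (cnt + 1) _ hlen' hins hinsp hmin2
    · simp [hK]

-- ===== VERDICT (by name: the statement is the Claim_ definition above) =====
theorem solution_spec : Claim_equal_solution := by
  intro scoville K _hdom hpre
  unfold Spec_solution solution solution_alt
  cases hm : PySem.List.min? scoville (fun x => x) with
  | none => exact absurd ((PySem.List.min?_eq_none_iff _ _).mp hm) hpre
  | some first =>
    have hmem : first ∈ scoville := PySem.List.min?_mem hm
    have hmin : ∀ y ∈ scoville, first ≤ y := fun y hy => PySem.List.min?_isMin hm y hy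
    have hp : (PySem.List.sorted scoville (fun x => x) false).Perm
        (first :: scoville.erase first) :=
      (PySem.List.sorted_perm ..).trans (List.perm_cons_erase hmem)
    have hs : (PySem.List.sorted scoville (fun x => x) false).Pairwise (· ≤ ·) := by
      have := PySem.List.sorted_pairwise (xs := scoville) (key := fun x => x)
      simpa using this
    exact loop_eq (scoville.erase first).length (scoville.erase first) first K 0 _
      le_rfl hp hs (fun x hx => hmin x (List.mem_of_mem_erase hx))
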